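-- pv_equiv track=rewrite | github.com/jazzzman/AlgoPractice | Heaps/Medium/MinHeapConstruction.py | minHeapConstruction
-- ===== SOURCE A (Python) =====
-- class MinHeap:
--     def __init__(self, array):
--         self.buildHeap(array)
--
--     def buildHeap(self, array):
--         self.heap = array
--         parent = (len(array)-1)//2
--         for idx in reversed(range(parent+1)):
--             self.siftDown(idx)
--
--     def insert(self, value):
--         self.heap.append(value)
--         self.siftUp(len(self.heap)-1)
--
--
--     def remove(self):
--         self.heap[0], self.heap[-1] = self.heap[-1], self.heap[0]
--         removedValue = self.heap.pop()
--         self.siftDown(0)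
--         return removedValue
--
--     def siftUp(self, idx):
--         parent = (idx-1)//2
--
--         while idx>0 and self.heap[idx]<self.heap[parent]:
--             self.heap[idx], self.heap[parent] = self.heap[parent], self.heap[idx]
--             idx = parent
--             parent = (idx-1)//2
--
--     def siftDown(self, idx):
--         heap = self.heap
--         child1 = 2*idx+1
--         while child1<len(heap):
--             child2 = 2*idx+2 if 2*idx+2<len(heap) else -1
--             idxToSwap = child2 if child2 != -1 and heap[child2]<heap[child1] else child1
--             if heap[idx]>heap[idxToSwap]:
--                 heap[idx], heap[idxToSwap] = heap[idxToSwap], heap[idx]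
--                 idx = idxToSwap
--                 child1 = 2*idx+1
--             else:
--                 return
--
-- def minHeapConstruction(array, method, values):
--     if method == 'buildHeap':
--         return MinHeap(array).heap
--     elif method == 'insert':
--         minHeap = MinHeap(array)
--         for value in values:
--             minHeap.insert(value)
--         return minHeap.heap
--     elif method == 'remove':
--         minHeap = MinHeap(array)
--         for value in values:
--             minHeap.remove()
--         return minHeap.heap
--
--     return []
-- ===== SOURCE B (Python) =====
-- # Class-free rewrite: one shared heapify pass, recursive smallest-of-three
-- # siftDown and recursive siftUp instead of the while-loop class methods.
-- def _smallest(heap, idx):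
--     n = len(heap)
--     s = idx
--     c1 = 2 * idx + 1
--     c2 = 2 * idx + 2
--     if c1 < n and heap[c1] < heap[idx]:
--         s = c1
--     if c2 < n and heap[c2] < heap[s]:
--         s = c2
--     return s
--
-- def _siftDown(heap, idx):
--     s = _smallest(heap, idx)
--     if s != idx:
--         heap[idx], heap[s] = heap[s], heap[idx]
--         _siftDown(heap, s)
--
-- def _siftUp(heap, idx):
--     if idx == 0:
--         return
--     p = (idx - 1) // 2
--     if heap[p] <= heap[idx]:
--         return
--     heap[idx], heap[p] = heap[p], heap[idx]
--     _siftUp(heap, p)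
--
-- def minHeapConstruction(array, method, values):
--     if method not in ('buildHeap', 'insert', 'remove'):
--         return []
--     heap = array
--     for idx in reversed(range(len(heap) // 2)):
--         _siftDown(heap, idx)
--     if method == 'insert':
--         for v in values:
--             heap.append(v)
--             _siftUp(heap, len(heap) - 1)
--     elif method == 'remove':
--         for _ in values:
--             last = heap.pop()
--             if heap:
--                 heap[0] = last
--                 _siftDown(heap, 0)
--     return heap
-- ===== Notes on version B (the rewrite author's own statement) =====
-- stated objective: alternative
-- what changed: Replaces the MinHeap class and its while-loop siftUp/siftDown with plain functions: a recursive smallest-of-three siftDown (separate _smallest selector), a recursive guard-first siftUp, one shared heapify pass over range(len//2) instead of (len-1)//2+1 indices, and a pop-then-overwrite remove instead of swap-then-pop.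
import Mathlib
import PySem

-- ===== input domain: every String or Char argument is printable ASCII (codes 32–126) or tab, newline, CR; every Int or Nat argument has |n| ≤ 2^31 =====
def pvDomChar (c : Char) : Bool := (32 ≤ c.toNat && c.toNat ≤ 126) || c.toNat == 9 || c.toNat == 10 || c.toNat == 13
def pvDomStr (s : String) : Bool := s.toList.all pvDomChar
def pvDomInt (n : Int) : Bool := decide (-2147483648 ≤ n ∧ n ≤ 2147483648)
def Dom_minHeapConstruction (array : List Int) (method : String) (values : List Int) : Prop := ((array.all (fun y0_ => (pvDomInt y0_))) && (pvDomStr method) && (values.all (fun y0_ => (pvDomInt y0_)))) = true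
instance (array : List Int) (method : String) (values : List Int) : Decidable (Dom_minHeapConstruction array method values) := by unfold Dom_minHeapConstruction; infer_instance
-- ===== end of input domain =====

-- B replaces the MinHeap class by plain functions with a shared heapify pass and
-- recursive smallest-of-three siftDown / recursive siftUp (objective: alternative
-- decomposition, same cost). Both A and B mutate `array` in place; the equivalence
-- proved here is about the RETURN value only.
-- The sift loops/recursions are ported with a fuel counter (fuel = heap length - idx,
-- resp. idx); the fuel is always sufficient — the index at least doubles (resp. halves)
-- each step — so the fuel guard never fires and the ports are exact.

-- ===== PORT A =====
-- Python swap 'l[i], l[j] = l[j], l[i]' (indices nonnegative and in range wherever used)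
def pvSwap (l : List Int) (i j : Nat) : List Int := (l.set i (l.getD j 0)).set j (l.getD i 0)

-- A.siftDown: while-loop on the growing index; child2 keeps A's -1 sentinel
def siftDownAGo : Nat → List Int → Nat → List Int
  | 0, l, _ => l
  | fuel + 1, l, idx =>
    if 2 * idx + 1 < l.length then
      let child2 : Int := if 2 * idx + 2 < l.length then ((2 * idx + 2 : Nat) : Int) else -1
      let idxToSwap : Nat :=
        if child2 ≠ -1 ∧ l.getD (2 * idx + 2) 0 < l.getD (2 * idx + 1) 0 then 2 * idx + 2
        else 2 * idx + 1
      if l.getD idx 0 > l.getD idxToSwap 0 then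
        siftDownAGo fuel (pvSwap l idx idxToSwap) idxToSwap
      else l
    else l

def siftDownA (l : List Int) (idx : Nat) : List Int := siftDownAGo (l.length - idx) l idx

-- A.siftUp: while-loop on the shrinking index
def siftUpAGo : Nat → List Int → Nat → List Int
  | 0, l, _ => l
  | fuel + 1, l, idx =>
    if 0 < idx ∧ l.getD idx 0 < l.getD ((idx - 1) / 2) 0 then
      siftUpAGo fuel (pvSwap l idx ((idx - 1) / 2)) ((idx - 1) / 2)
    else l

def siftUpA (l : List Int) (idx : Nat) : List Int := siftUpAGo idx l idx

-- A.buildHeap: parent = (len-1)//2 (Python floor division), sift indices parent..0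
def buildHeapA (array : List Int) : List Int :=
  (List.range (PySem.Int.floordiv ((array.length : Int) - 1) 2 + 1).toNat).reverse.foldl
    (fun h i => siftDownA h i) array

-- A.insert
def insertA (l : List Int) (v : Int) : List Int :=
  siftUpA (l ++ [v]) ((l ++ [v]).length - 1)

-- A.remove (the popped value is discarded by the dispatcher)
def removeA (l : List Int) : List Int :=
  siftDownA ((pvSwap l 0 (l.length - 1)).dropLast) 0

def minHeapConstruction (array : List Int) (method : String) (values : List Int) : List Int :=
  if method == "buildHeap" then buildHeapA array
  else if method == "insert" then values.foldl (fun h v => insertA h v) (buildHeapA array)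
  else if method == "remove" then values.foldl (fun h _ => removeA h) (buildHeapA array)
  else []

-- ===== PORT B =====
-- Source B _smallest
def sChild (l : List Int) (idx : Nat) : Nat :=
  let s1 := if 2 * idx + 1 < l.length ∧ l.getD (2 * idx + 1) 0 < l.getD idx 0 then 2 * idx + 1 else idx
  if 2 * idx + 2 < l.length ∧ l.getD (2 * idx + 2) 0 < l.getD s1 0 then 2 * idx + 2 else s1

-- Source B _siftDown (recursive)
def siftDownBGo : Nat → List Int → Nat → List Int
  | 0, l, _ => l
  | fuel + 1, l, idx =>
    if sChild l idx ≠ idx then siftDownBGo fuel (pvSwap l idx (sChild l idx)) (sChild l idx)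
    else l

def siftDownB (l : List Int) (idx : Nat) : List Int := siftDownBGo (l.length - idx) l idx

-- Source B _siftUp (recursive, guard-first)
def siftUpBGo : Nat → List Int → Nat → List Int
  | 0, l, _ => l
  | fuel + 1, l, idx =>
    if idx = 0 then l
    else if l.getD ((idx - 1) / 2) 0 ≤ l.getD idx 0 then l
    else siftUpBGo fuel (pvSwap l idx ((idx - 1) / 2)) ((idx - 1) / 2)

def siftUpB (l : List Int) (idx : Nat) : List Int := siftUpBGo idx l idx

-- Source B heapify pass: reversed(range(len//2))
def buildHeapB (array : List Int) : List Int :=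
  (List.range (array.length / 2)).reverse.foldl (fun h i => siftDownB h i) array

-- Source B remove-loop body: last = pop(); if heap: heap[0] = last; siftDown(0)
def removeB (l : List Int) : List Int :=
  match l.getLast? with
  | none => l
  | some last =>
      let rest := l.dropLast
      if rest.isEmpty then rest else siftDownB (rest.set 0 last) 0

def minHeapConstruction_alt (array : List Int) (method : String) (values : List Int) : List Int :=
  if method ≠ "buildHeap" ∧ method ≠ "insert" ∧ method ≠ "remove" then []
  else
    let heap := buildHeapB array
    if method == "insert" then values.foldl (fun h v => siftUpB (h ++ [v]) ((h ++ [v]).length - 1)) heap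
    else if method == "remove" then values.foldl (fun h _ => removeB h) heap
    else heap

-- ===== PRECONDITION & SPEC =====
-- Pre_ excludes only the inputs where Python A raises IndexError: method 'remove'
-- with more removals than elements (both Pythons raise there).
def Pre_minHeapConstruction (array : List Int) (method : String) (values : List Int) : Prop :=
  method = "remove" → values.length ≤ array.length
instance (array : List Int) (method : String) (values : List Int) : Decidable (Pre_minHeapConstruction array method values) := by unfold Pre_minHeapConstruction; infer_instance

def pvWitness_minHeapConstruction : List Int × String × List Int := ([9, 4, 7, 1], "remove", [0, 0])

def Spec_minHeapConstruction (array : List Int) (method : String) (values : List Int) (out : List Int) : Prop := out = minHeapConstruction_alt array method values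
instance (array : List Int) (method : String) (values : List Int) (out : List Int) : Decidable (Spec_minHeapConstruction array method values out) := by unfold Spec_minHeapConstruction; infer_instance

-- ===== CLAIM (what is proved, stated in full; the proofs are below) =====
def Claim_equal_minHeapConstruction : Prop := ∀ (array : List Int) (method : String) (values : List Int), Dom_minHeapConstruction array method values → Pre_minHeapConstruction array method values → Spec_minHeapConstruction array method values (minHeapConstruction array method values)

-- ===== LEMMAS AND PROOFS =====

-- one-step agreement of the two sift-down branch selections, then induction on the fuel
theorem siftDownGo_eq (fuel : Nat) : ∀ (l : List Int) (idx : Nat),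
    siftDownAGo fuel l idx = siftDownBGo fuel l idx := by
  induction fuel with
  | zero => intro l idx; rfl
  | succ fuel ih =>
    intro l idx
    rw [siftDownAGo, siftDownBGo]
    by_cases h1 : 2 * idx + 1 < l.length
    · simp only [if_pos h1]
      by_cases h2 : 2 * idx + 2 < l.length
      · by_cases hw : l.getD (2 * idx + 2) 0 < l.getD (2 * idx + 1) 0
        · -- A picks child2; swaps iff l[idx] > l[c2]
          have hsent : ((if 2 * idx + 2 < l.length then ((2 * idx + 2 : Nat) : Int) else -1) ≠ -1)
              ∧ l.getD (2 * idx + 2) 0 < l.getD (2 * idx + 1) 0 := by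
            refine ⟨?_, hw⟩; simp [h2]; omega
          simp only [if_pos hsent]
          by_cases hgt : l.getD idx 0 > l.getD (2 * idx + 2) 0
          · have hc : sChild l idx = 2 * idx + 2 := by
              unfold sChild; dsimp only; split_ifs <;> omega
            rw [if_pos hgt, if_pos (by omega : sChild l idx ≠ idx), hc]
            exact ih _ _
          · have hc : sChild l idx = idx := by
              unfold sChild; dsimp only; split_ifs <;> omega
            rw [if_neg hgt, if_neg (by omega : ¬ sChild l idx ≠ idx)]
        · -- A picks child1; swaps iff l[idx] > l[c1]
          have hsent : ¬ (((if 2 * idx + 2 < l.length then ((2 * idx + 2 : Nat) : Int) else -1) ≠ -1)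
              ∧ l.getD (2 * idx + 2) 0 < l.getD (2 * idx + 1) 0) := by
            intro hcon; exact hw hcon.2
          simp only [if_neg hsent]
          by_cases hgt : l.getD idx 0 > l.getD (2 * idx + 1) 0
          · have hc : sChild l idx = 2 * idx + 1 := by
              unfold sChild; dsimp only; split_ifs <;> omega
            rw [if_pos hgt, if_pos (by omega : sChild l idx ≠ idx), hc]
            exact ih _ _
          · have hc : sChild l idx = idx := by
              unfold sChild; dsimp only; split_ifs <;> omega
            rw [if_neg hgt, if_neg (by omega : ¬ sChild l idx ≠ idx)]
      · -- no child2: the sentinel stays -1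
        have hsent : ¬ (((if 2 * idx + 2 < l.length then ((2 * idx + 2 : Nat) : Int) else -1) ≠ -1)
            ∧ l.getD (2 * idx + 2) 0 < l.getD (2 * idx + 1) 0) := by
          intro hcon; apply hcon.1; simp [h2]
        simp only [if_neg hsent]
        by_cases hgt : l.getD idx 0 > l.getD (2 * idx + 1) 0
        · have hc : sChild l idx = 2 * idx + 1 := by
            unfold sChild; dsimp only; split_ifs <;> omega
          rw [if_pos hgt, if_pos (by omega : sChild l idx ≠ idx), hc]
          exact ih _ _
        · have hc : sChild l idx = idx := by
            unfold sChild; dsimp only; split_ifs <;> omega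
          rw [if_neg hgt, if_neg (by omega : ¬ sChild l idx ≠ idx)]
    · have h2 : sChild l idx = idx := by unfold sChild; dsimp only; split_ifs <;> omega
      simp [h1, h2]

theorem siftDown_eq (l : List Int) (idx : Nat) : siftDownA l idx = siftDownB l idx :=
  siftDownGo_eq (l.length - idx) l idx

theorem siftUpGo_eq (fuel : Nat) : ∀ (l : List Int) (idx : Nat),
    siftUpAGo fuel l idx = siftUpBGo fuel l idx := by
  induction fuel with
  | zero => intro l idx; rfl
  | succ fuel ih =>
    intro l idx
    rw [siftUpAGo, siftUpBGo]
    by_cases h0 : idx = 0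
    · simp [h0]
    · rw [if_neg h0]
      by_cases hlt : l.getD idx 0 < l.getD ((idx - 1) / 2) 0
      · rw [if_pos ⟨by omega, hlt⟩,
            if_neg (by omega : ¬ l.getD ((idx - 1) / 2) 0 ≤ l.getD idx 0)]
        exact ih _ _
      · rw [if_neg (by intro hcon; exact hlt hcon.2),
            if_pos (by omega : l.getD ((idx - 1) / 2) 0 ≤ l.getD idx 0)]

theorem siftUp_eq (l : List Int) (idx : Nat) : siftUpA l idx = siftUpB l idx :=
  siftUpGo_eq idx l idx

-- sifting a leaf is a no-op (A's heapify visits one extra leaf index on odd lengths)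
theorem siftDownA_leaf (l : List Int) (idx : Nat) (h : ¬ 2 * idx + 1 < l.length) :
    siftDownA l idx = l := by
  unfold siftDownA
  cases l.length - idx with
  | zero => rfl
  | succ f => rw [siftDownAGo, if_neg h]

theorem buildHeap_eq (array : List Int) : buildHeapA array = buildHeapB array := by
  unfold buildHeapA buildHeapB
  have hfun : (fun (h : List Int) (i : Nat) => siftDownA h i)
      = fun h i => siftDownB h i := by
    funext h i; exact siftDown_eq h i
  rw [hfun]
  have hcnt : (PySem.Int.floordiv ((array.length : Int) - 1) 2 + 1).toNat
      = (array.length + 1) / 2 := by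
    cases hn : array.length with
    | zero => decide
    | succ n =>
      have hstep : PySem.Int.floordiv ((n : Nat) : Int) 2 = ((n / 2 : Nat) : Int) := by
        exact_mod_cast PySem.Int.floordiv_natCast n 2
      have hc : ((n + 1 : Nat) : Int) - 1 = ((n : Nat) : Int) := by push_cast; ring
      rw [hc, hstep]
      omega
  rw [hcnt]
  by_cases hp : array.length % 2 = 0
  · have h0 : (array.length + 1) / 2 = array.length / 2 := by omega
    rw [h0]
  · have h1 : (array.length + 1) / 2 = array.length / 2 + 1 := by omega
    rw [h1, List.range_succ, List.reverse_append, List.reverse_singleton,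
        List.singleton_append, List.foldl_cons]
    rw [← siftDown_eq, siftDownA_leaf array (array.length / 2) (by omega)]

theorem remove_eq (l : List Int) : removeA l = removeB l := by
  unfold removeA removeB
  rcases hl : l.getLast? with _ | last
  · have : l = [] := List.getLast?_eq_none_iff.mp hl
    subst this
    rfl
  · dsimp only
    have hne : l ≠ [] := by intro h; subst h; simp at hl
    have hn : 0 < l.length := List.length_pos_iff.mpr hne
    by_cases h1 : l.length = 1
    · -- one element: both return []
      have hdrop : l.dropLast = [] := by
        apply List.eq_nil_of_length_eq_zero
        simp [List.length_dropLast]; omega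
      have hA : (pvSwap l 0 (l.length - 1)).dropLast = [] := by
        apply List.eq_nil_of_length_eq_zero
        simp [List.length_dropLast, pvSwap]; omega
      rw [hA, hdrop]
      rfl
    · -- length ≥ 2
      have h2 : 2 ≤ l.length := by omega
      have hdropne : ¬ l.dropLast.isEmpty := by
        simp only [List.isEmpty_iff]
        intro hcon
        have := congrArg List.length hcon
        simp [List.length_dropLast] at this
        omega
      rw [if_neg hdropne, siftDown_eq]
      congr 1
      have hlast : l.getD (l.length - 1) 0 = last := by
        rw [List.getLast?_eq_getElem?] at hl
        rw [List.getD_eq_getElem?_getD, hl]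
        rfl
      apply List.ext_getElem
      · simp [pvSwap, List.length_dropLast]
      · intro i hi1 hi2
        have hi : i < l.length - 1 := by
          simpa [pvSwap, List.length_dropLast] using hi1
        rw [List.getElem_dropLast]
        simp only [pvSwap]
        rw [List.getElem_set_ne (by omega)]
        by_cases h0 : i = 0
        · subst h0
          simp
          rw [← List.getD_eq_getElem?_getD]
          exact hlast
        · rw [List.getElem_set_ne (by omega), List.getElem_set_ne (by omega),
              List.getElem_dropLast]

theorem insert_fold_eq (values : List Int) (h : List Int) :
    values.foldl (fun h v => insertA h v) h
      = values.foldl (fun h v => siftUpB (h ++ [v]) ((h ++ [v]).length - 1)) h := by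
  have : (fun (h : List Int) (v : Int) => insertA h v)
      = fun h v => siftUpB (h ++ [v]) ((h ++ [v]).length - 1) := by
    funext h v; unfold insertA; exact siftUp_eq _ _
  rw [this]

-- ===== VERDICT (by name: the statement is the Claim_ definition above) =====
theorem minHeapConstruction_spec : Claim_equal_minHeapConstruction := by
  intro array method values _ _
  unfold Spec_minHeapConstruction minHeapConstruction minHeapConstruction_alt
  by_cases hb : method = "buildHeap"
  · simp [hb, buildHeap_eq]
  · by_cases hi : method = "insert"
    · simp [hi, buildHeap_eq, insert_fold_eq]
    · by_cases hr : method = "remove"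
      · have : (fun (h : List Int) (_ : Int) => removeA h)
            = fun h _ => removeB h := by funext h v; exact remove_eq h
        simp [hr, buildHeap_eq, this]
      · simp [hb, hi, hr]
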